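-- pv_equiv track=rewrite | github.com/nishatrhythm/Bangladesh-Railway-Train-Seat-Matrix-Web-Application | app.py | get_common_trains
-- ===== SOURCE A (Python) =====
-- def get_common_trains(trains_day1, trains_day2):
--     all_trains = {}
--
--     for train in trains_day1:
--         trip_number = train.get('trip_number', '')
--         if trip_number and trip_number not in all_trains:
--             all_trains[trip_number] = {
--                 'trip_number': trip_number,
--                 'departure_time': train.get('departure_date_time', ''),
--                 'arrival_time': train.get('arrival_date_time', ''),
--                 'travel_time': train.get('travel_time', ''),
--                 'origin_city': train.get('origin_city_name', ''),
--                 'destination_city': train.get('destination_city_name', ''),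
--                 'sort_time': extract_time_for_sorting(train.get('departure_date_time', ''))
--             }
--
--     for train in trains_day2:
--         trip_number = train.get('trip_number', '')
--         if trip_number and trip_number not in all_trains:
--             all_trains[trip_number] = {
--                 'trip_number': trip_number,
--                 'departure_time': train.get('departure_date_time', ''),
--                 'arrival_time': train.get('arrival_date_time', ''),
--                 'travel_time': train.get('travel_time', ''),
--                 'origin_city': train.get('origin_city_name', ''),
--                 'destination_city': train.get('destination_city_name', ''),
--                 'sort_time': extract_time_for_sorting(train.get('departure_date_time', ''))
--             }
--
--     trains_list = list(all_trains.values())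
--     trains_list.sort(key=lambda x: x.get('sort_time', ''))
--
--     for train in trains_list:
--         train.pop('sort_time', None)
--
--     return trains_list
--
-- def extract_time_for_sorting(departure_time_str):
--     try:
--         if not departure_time_str:
--             return "99:99"
--
--         time_part = departure_time_str.split(',')[-1].strip()
--
--         if 'am' in time_part.lower():
--             time_clean = time_part.lower().replace('am', '').strip()
--             hour, minute = time_clean.split(':')
--             hour = int(hour)
--             if hour == 12:
--                 hour = 0
--         elif 'pm' in time_part.lower():
--             time_clean = time_part.lower().replace('pm', '').strip()
--             hour, minute = time_clean.split(':')
--             hour = int(hour)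
--             if hour != 12:
--                 hour += 12
--         else:
--             return "99:99"
--
--         return f"{hour:02d}:{minute}"
--
--     except Exception:
--         return "99:99"
-- ===== SOURCE B (Python) =====
-- def extract_time_for_sorting(departure_time_str):
--     try:
--         if not departure_time_str:
--             return "99:99"
--         time_part = departure_time_str.split(',')[-1].strip()
--         if 'am' in time_part.lower():
--             time_clean = time_part.lower().replace('am', '').strip()
--             hour, minute = time_clean.split(':')
--             hour = int(hour)
--             if hour == 12:
--                 hour = 0
--         elif 'pm' in time_part.lower():
--             time_clean = time_part.lower().replace('pm', '').strip()
--             hour, minute = time_clean.split(':')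
--             hour = int(hour)
--             if hour != 12:
--                 hour += 12
--         else:
--             return "99:99"
--         return f"{hour:02d}:{minute}"
--     except Exception:
--         return "99:99"
--
--
-- def get_common_trains(trains_day1, trains_day2):
--     # Online insertion sort: the result list is kept sorted at every moment, so
--     # there is no sort() call at the end, no auxiliary 'sort_time' field and no
--     # cleanup pass.  Each new (first-occurrence, nonempty trip) record is
--     # inserted AFTER all records with key <= its key, which preserves exactly
--     # the stable day1-before-day2 tie order of a stable batch sort.
--     seen = set()
--     result = []
--     for train in trains_day1 + trains_day2:
--         trip_number = train.get('trip_number', '')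
--         if trip_number and trip_number not in seen:
--             seen.add(trip_number)
--             record = {
--                 'trip_number': trip_number,
--                 'departure_time': train.get('departure_date_time', ''),
--                 'arrival_time': train.get('arrival_date_time', ''),
--                 'travel_time': train.get('travel_time', ''),
--                 'origin_city': train.get('origin_city_name', ''),
--                 'destination_city': train.get('destination_city_name', ''),
--             }
--             key = extract_time_for_sorting(record['departure_time'])
--             i = 0
--             while i < len(result) and extract_time_for_sorting(result[i]['departure_time']) <= key:
--                 i += 1
--             result.insert(i, record)
--     return result
-- ===== Notes on version B (the rewrite author's own statement) =====
-- stated objective: alternative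
-- what changed: Replaces A's decorate-sort-undecorate pipeline (build a dict of records carrying an extra 'sort_time' field, batch-sort at the end, then a cleanup pass popping the field) with an online stable insertion sort: a single pass over the concatenated lists that, using a separate seen-set for dedup, inserts each new plain record directly at its sorted position, so the result is sorted at all times and there is no sort call, no auxiliary field and no cleanup pass.
import Mathlib
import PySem

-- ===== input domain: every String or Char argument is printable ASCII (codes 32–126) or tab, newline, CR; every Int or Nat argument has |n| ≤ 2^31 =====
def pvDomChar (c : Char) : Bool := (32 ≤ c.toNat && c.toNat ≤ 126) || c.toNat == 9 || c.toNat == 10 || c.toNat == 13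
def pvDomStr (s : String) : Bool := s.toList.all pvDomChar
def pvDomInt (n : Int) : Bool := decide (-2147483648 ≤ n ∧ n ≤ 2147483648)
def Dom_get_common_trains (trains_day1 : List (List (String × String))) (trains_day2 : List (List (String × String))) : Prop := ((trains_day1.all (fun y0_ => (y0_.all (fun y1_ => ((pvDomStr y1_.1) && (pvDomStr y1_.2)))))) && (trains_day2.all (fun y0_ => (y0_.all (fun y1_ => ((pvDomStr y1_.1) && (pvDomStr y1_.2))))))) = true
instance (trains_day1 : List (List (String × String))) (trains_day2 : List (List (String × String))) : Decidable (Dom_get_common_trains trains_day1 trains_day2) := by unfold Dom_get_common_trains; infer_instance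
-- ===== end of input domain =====

-- B replaces A's decorate-sort-undecorate (extra 'sort_time' field, batch sort, cleanup pass)
-- by an online stable insertion sort with a separate seen-set (objective: alternative).

-- ===== SHARED HELPER (the module helper extract_time_for_sorting, identical in Source A and Source B) =====

-- train.get(k, '') on a Python dict modelled as an association list (first match wins)
def pvGetS (train : List (String × String)) (k : String) : String :=
  (PySem.Dict.mk train).getD k ""

-- extract_time_for_sorting; the f-string f"{hour:02d}" is ported as str(hour).zfill(2),
-- which is exact for width 2 (sign stays in front); every caught exception branch
-- (unpack of split(':'), int()) returns "99:99" exactly where Python's except does.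
def extractTime (s : String) : String :=
  if s = "" then "99:99"
  else
    match PySem.Str.split? s "," with
    | none => "99:99"      -- unreachable: separator "," is nonempty
    | some parts =>
      match PySem.List.pyGet? parts (-1) with
      | none => "99:99"    -- unreachable: split never returns an empty list
      | some last =>
        let tp := PySem.Str.strip last
        if PySem.Str.isIn "am" (PySem.Str.lower tp) then
          match PySem.Str.split? (PySem.Str.strip (PySem.Str.replace (PySem.Str.lower tp) "am" "")) ":" with
          | some [h, m] =>
            match PySem.Int.ofStr? h with
            | some hour =>
              let hour := if hour = 12 then 0 else hour
              PySem.Str.zfill (PySem.Int.toStr hour) 2 ++ ":" ++ m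
            | none => "99:99"
          | _ => "99:99"
        else if PySem.Str.isIn "pm" (PySem.Str.lower tp) then
          match PySem.Str.split? (PySem.Str.strip (PySem.Str.replace (PySem.Str.lower tp) "pm" "")) ":" with
          | some [h, m] =>
            match PySem.Int.ofStr? h with
            | some hour =>
              let hour := if hour ≠ 12 then hour + 12 else hour
              PySem.Str.zfill (PySem.Int.toStr hour) 2 ++ ":" ++ m
            | none => "99:99"
          | _ => "99:99"
        else "99:99"

-- ===== PORT A =====

-- the dict literal A stores in all_trains (7 keys, in order, 'sort_time' last)
def buildRecordA (t : String) (train : List (String × String)) : PySem.Dict String String :=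
  PySem.Dict.mk
    [("trip_number", t),
     ("departure_time", pvGetS train "departure_date_time"),
     ("arrival_time", pvGetS train "arrival_date_time"),
     ("travel_time", pvGetS train "travel_time"),
     ("origin_city", pvGetS train "origin_city_name"),
     ("destination_city", pvGetS train "destination_city_name"),
     ("sort_time", extractTime (pvGetS train "departure_date_time"))]

-- one iteration of A's (identical) day1/day2 loops
def stepA (d : PySem.Dict String (PySem.Dict String String)) (train : List (String × String)) :
    PySem.Dict String (PySem.Dict String String) :=
  let t := pvGetS train "trip_number"
  if t != "" && !(d.contains t) then d.insert t (buildRecordA t train) else d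

def get_common_trains (trains_day1 : List (List (String × String))) (trains_day2 : List (List (String × String))) : List (List (String × String)) :=
  let all1 := trains_day1.foldl stepA PySem.Dict.empty
  let all2 := trains_day2.foldl stepA all1
  let trains_list := all2.values
  let sortedL := PySem.List.sorted trains_list (fun x => x.getD "sort_time" "")
  sortedL.map (fun r => (r.erase "sort_time").items)   -- train.pop('sort_time', None)

-- ===== PORT B =====

-- the plain 6-field record Source B builds (no 'sort_time')
def recordB (t : String) (train : List (String × String)) : List (String × String) :=
  [("trip_number", t),
   ("departure_time", pvGetS train "departure_date_time"),
   ("arrival_time", pvGetS train "arrival_date_time"),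
   ("travel_time", pvGetS train "travel_time"),
   ("origin_city", pvGetS train "origin_city_name"),
   ("destination_city", pvGetS train "destination_city_name")]

-- extract_time_for_sorting(r['departure_time']) as used in Source B's scan
def keyOfB (r : List (String × String)) : String :=
  extractTime ((PySem.Dict.mk r).getD "departure_time" "")

-- Source B's front-to-back scan 'while i < len(result) and key(result[i]) <= key: i += 1'
-- followed by result.insert(i, record): insert after all records with key ≤ k
def insertSorted (rec : List (String × String)) (k : String) :
    List (List (String × String)) → List (List (String × String))
  | [] => [rec]
  | y :: ys => if keyOfB y ≤ k then y :: insertSorted rec k ys else rec :: y :: ys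

-- one iteration of Source B's single loop: state = (seen set, sorted result list)
def stepB (st : PySem.Set String × List (List (String × String))) (train : List (String × String)) :
    PySem.Set String × List (List (String × String)) :=
  let t := pvGetS train "trip_number"
  if t != "" && !(PySem.Set.contains st.1 t) then
    let r := recordB t train
    (PySem.Set.add st.1 t, insertSorted r (keyOfB r) st.2)
  else st

def get_common_trains_alt (trains_day1 : List (List (String × String))) (trains_day2 : List (List (String × String))) : List (List (String × String)) :=
  ((trains_day1 ++ trains_day2).foldl stepB (PySem.Set.empty, [])).2

-- ===== PRECONDITION & SPEC =====
def Spec_get_common_trains (trains_day1 : List (List (String × String))) (trains_day2 : List (List (String × String))) (out : List (List (String × String))) : Prop := out = get_common_trains_alt trains_day1 trains_day2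
instance (trains_day1 : List (List (String × String))) (trains_day2 : List (List (String × String))) (out : List (List (String × String))) : Decidable (Spec_get_common_trains trains_day1 trains_day2 out) := by unfold Spec_get_common_trains; infer_instance

-- ===== CLAIM (what is proved, stated in full; the proofs are below) =====
def Claim_equal_get_common_trains : Prop := ∀ (trains_day1 : List (List (String × String))) (trains_day2 : List (List (String × String))), Dom_get_common_trains trains_day1 trains_day2 → Spec_get_common_trains trains_day1 trains_day2 (get_common_trains trains_day1 trains_day2)

-- ===== LEMMAS AND PROOFS =====

-- the (trip_number, train) pairs both programs keep, in order of first occurrence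
def keep (seen : List String) : List (List (String × String)) → List (String × List (String × String))
  | [] => []
  | tr :: L =>
    let t := pvGetS tr "trip_number"
    if t != "" && !(seen.contains t) then (t, tr) :: keep (seen ++ [t]) L else keep seen L

-- the sort key of a kept pair
def pairKey (p : String × List (String × String)) : String :=
  extractTime (pvGetS p.2 "departure_date_time")

-- the kept pairs, insertion-sorted by pairKey (the common core of both pipelines)
def core (rs : List (String × List (String × String))) : List (String × List (String × String)) :=
  rs.foldl (fun acc p => PySem.List.insertBy (fun a b => decide (pairKey a < pairKey b)) p acc) []

-- shape facts about the two record builders -------------------------------------------------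

theorem sortTime_buildRecordA (t : String) (train : List (String × String)) :
    (buildRecordA t train).getD "sort_time" "" = pairKey (t, train) := by
  simp [buildRecordA, pairKey, PySem.Dict.getD, PySem.Dict.get?_mk_cons]

theorem keyOfB_recordB (t : String) (train : List (String × String)) :
    keyOfB (recordB t train) = pairKey (t, train) := by
  simp [keyOfB, recordB, pairKey, PySem.Dict.getD, PySem.Dict.get?_mk_cons]

theorem erase_buildRecordA (t : String) (train : List (String × String)) :
    ((buildRecordA t train).erase "sort_time").items = recordB t train := by
  simp [buildRecordA, recordB, PySem.Dict.erase]

-- insertBy commutes with map --------------------------------------------------------------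

theorem insertBy_map {α β : Type} (h : α → β) (ba : α → α → Bool) (bb : β → β → Bool)
    (hc : ∀ x y, bb (h x) (h y) = ba x y) (x : α) :
    ∀ l : List α, (PySem.List.insertBy ba x l).map h = PySem.List.insertBy bb (h x) (l.map h) := by
  intro l
  induction l with
  | nil => simp [PySem.List.insertBy]
  | cons y ys ih => simp [PySem.List.insertBy, hc]; split_ifs <;> simp [*]

theorem foldl_insertBy_map {α β : Type} (h : α → β) (ba : α → α → Bool) (bb : β → β → Bool)
    (hc : ∀ x y, bb (h x) (h y) = ba x y) :
    ∀ (rs : List α) (acc : List α),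
      (rs.foldl (fun a p => PySem.List.insertBy ba p a) acc).map h =
        rs.foldl (fun a p => PySem.List.insertBy bb (h p) a) (acc.map h) := by
  intro rs
  induction rs with
  | nil => intro acc; rfl
  | cons p ps ih => intro acc; simp only [List.foldl_cons, ih, insertBy_map h ba bb hc]

-- Source B's insertSorted is insertBy on the same key ------------------------------------------

theorem insertSorted_eq_insertBy (rec : List (String × String)) :
    ∀ l, insertSorted rec (keyOfB rec) l =
      PySem.List.insertBy (fun a b => decide (keyOfB a < keyOfB b)) rec l := by
  intro l
  induction l with
  | nil => rfl
  | cons y ys ih =>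
    simp only [insertSorted, PySem.List.insertBy, ih]
    by_cases hle : keyOfB y ≤ keyOfB rec
    · rw [if_pos hle, if_neg (by simpa using not_lt.mpr hle)]
    · rw [if_neg hle, if_pos (by simpa using lt_of_not_ge hle)]

-- membership tests agree -------------------------------------------------------------------

theorem contains_map_fst {β : Type} (t : String) :
    ∀ rs : List (String × β), (rs.map Prod.fst).contains t = rs.any (fun p => p.1 == t) := by
  intro rs
  induction rs with
  | nil => rfl
  | cons p ps ih => rw [List.map_cons, List.contains_cons, ih, List.any_cons, BEq.comm]

-- A's dict fold, tracked through keep ------------------------------------------------------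

def gpair (p : String × List (String × String)) : String × PySem.Dict String String :=
  (p.1, buildRecordA p.1 p.2)

theorem foldl_stepA_keep :
    ∀ (L : List (List (String × String))) (rs : List (String × List (String × String))),
      L.foldl stepA (PySem.Dict.mk (rs.map gpair)) =
        PySem.Dict.mk ((rs ++ keep (rs.map Prod.fst) L).map gpair) := by
  intro L
  induction L with
  | nil => intro rs; simp [keep]
  | cons tr L ih =>
    intro rs
    simp only [List.foldl_cons, stepA, keep]
    have hcont : (PySem.Dict.mk (rs.map gpair)).contains (pvGetS tr "trip_number") =
        (rs.map Prod.fst).contains (pvGetS tr "trip_number") := by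
      rw [PySem.Dict.contains_mk, contains_map_fst, List.any_map]
      rfl
    rw [hcont]
    by_cases hc : (pvGetS tr "trip_number" != "" &&
        !(rs.map Prod.fst).contains (pvGetS tr "trip_number")) = true
    · rw [if_pos hc, if_pos hc]
      have hfresh : (PySem.Dict.mk (rs.map gpair)).contains (pvGetS tr "trip_number") = false := by
        rw [hcont]
        rcases Bool.and_eq_true_iff.mp hc with ⟨-, h2⟩
        simpa using h2
      have hins : (PySem.Dict.mk (rs.map gpair)).insert (pvGetS tr "trip_number")
            (buildRecordA (pvGetS tr "trip_number") tr) =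
          PySem.Dict.mk ((rs ++ [(pvGetS tr "trip_number", tr)]).map gpair) := by
        apply PySem.Dict.ext
        rw [PySem.Dict.items_insert_of_not_contains _ _ hfresh]
        simp [gpair]
      rw [hins, ih (rs ++ [(pvGetS tr "trip_number", tr)])]
      simp [gpair]
    · rw [if_neg hc, if_neg hc, ih rs]

-- B's fold, tracked through keep -----------------------------------------------------------

def frec (p : String × List (String × String)) : List (String × String) := recordB p.1 p.2

theorem foldl_stepB_keep :
    ∀ (L : List (List (String × String))) (rs : List (String × List (String × String))),
      L.foldl stepB (rs.map Prod.fst, (core rs).map frec) =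
        ((rs ++ keep (rs.map Prod.fst) L).map Prod.fst,
          (core (rs ++ keep (rs.map Prod.fst) L)).map frec) := by
  intro L
  induction L with
  | nil => intro rs; simp [keep]
  | cons tr L ih =>
    intro rs
    simp only [List.foldl_cons, stepB, keep]
    have hsetc : PySem.Set.contains (rs.map Prod.fst) (pvGetS tr "trip_number") =
        (rs.map Prod.fst).contains (pvGetS tr "trip_number") := rfl
    by_cases hc : (pvGetS tr "trip_number" != "" &&
        !(rs.map Prod.fst).contains (pvGetS tr "trip_number")) = true
    · rw [hsetc, if_pos hc, if_pos hc]
      have hnotmem : (rs.map Prod.fst).contains (pvGetS tr "trip_number") = false := by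
        rcases Bool.and_eq_true_iff.mp hc with ⟨-, h2⟩
        simpa using h2
      have hadd : PySem.Set.add (rs.map Prod.fst) (pvGetS tr "trip_number") =
          rs.map Prod.fst ++ [pvGetS tr "trip_number"] := by
        unfold PySem.Set.add
        rw [hsetc, hnotmem]
        rfl
      have hins : insertSorted (recordB (pvGetS tr "trip_number") tr)
            (keyOfB (recordB (pvGetS tr "trip_number") tr)) ((core rs).map frec) =
          (core (rs ++ [(pvGetS tr "trip_number", tr)])).map frec := by
        rw [insertSorted_eq_insertBy]
        have : core (rs ++ [(pvGetS tr "trip_number", tr)]) =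
            PySem.List.insertBy (fun a b => decide (pairKey a < pairKey b))
              (pvGetS tr "trip_number", tr) (core rs) := by
          simp [core, List.foldl_append]
        rw [this, insertBy_map frec
          (fun a b => decide (pairKey a < pairKey b))
          (fun a b => decide (keyOfB a < keyOfB b))
          (fun x y => by simp [frec, keyOfB_recordB])]
        rfl
      have := ih (rs ++ [(pvGetS tr "trip_number", tr)])
      simp only [List.map_append, List.map_cons, List.map_nil] at this ⊢
      rw [hadd, hins] at *
      simpa [List.append_assoc] using this
    · rw [hsetc, if_neg hc, if_neg hc, ih rs]

-- ===== VERDICT (by name: the statement is the Claim_ definition above) =====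
theorem get_common_trains_spec : Claim_equal_get_common_trains := by
  intro td1 td2 _
  unfold Spec_get_common_trains
  simp only [get_common_trains, get_common_trains_alt]
  -- A's two loops are one fold over the concatenation
  rw [← List.foldl_append]
  have hA := foldl_stepA_keep (td1 ++ td2) []
  simp only [List.map_nil, List.nil_append] at hA
  have hB := foldl_stepB_keep (td1 ++ td2) []
  have hempty : (PySem.Dict.empty : PySem.Dict String (PySem.Dict String String)) =
      PySem.Dict.mk [] := rfl
  have hBstart : ((PySem.Set.empty : PySem.Set String), ([] : List (List (String × String)))) =
      (([] : List (String × List (String × String))).map Prod.fst, (core []).map frec) := rfl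
  rw [hempty, hA, hBstart, hB]
  simp only [List.map_nil, List.nil_append]
  set R := keep [] (td1 ++ td2) with hR
  -- A's values are the stored dicts in keep order
  have hvals : (PySem.Dict.mk (R.map gpair)).values = R.map (fun p => buildRecordA p.1 p.2) := by
    rw [PySem.Dict.values_mk, List.map_map]; rfl
  rw [hvals]
  -- the batch sort of the decorated records is the mapped core
  have hsort : PySem.List.sorted (R.map (fun p => buildRecordA p.1 p.2))
        (fun x => x.getD "sort_time" "") =
      (core R).map (fun p => buildRecordA p.1 p.2) := by
    rw [PySem.List.sorted_eq_foldl_insertBy, List.foldl_map]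
    rw [core, foldl_insertBy_map (fun p => buildRecordA p.1 p.2)
      (fun a b => decide (pairKey a < pairKey b))
      (fun a b => decide (a.getD "sort_time" "" < b.getD "sort_time" ""))
      (fun x y => by
        simp only []
        rw [sortTime_buildRecordA x.1 x.2, sortTime_buildRecordA y.1 y.2])]
    rfl
  rw [hsort, List.map_map]
  show _ = (core R).map frec
  -- popping 'sort_time' from a decorated record yields exactly B's plain record
  apply List.map_congr_left
  intro p _
  simpa [frec] using erase_buildRecordA p.1 p.2
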